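-- pv_equiv track=rewrite | github.com/FadulSikderUTA/GNNEXTestcases | src/stage_one/schema_report.py | _node_start
-- ===== SOURCE A (Python) =====
-- from typing import Dict, List, Set, Tuple, Iterable, Optional
--
-- def _node_start(line: str) -> Optional[Tuple[str, str]]:
--     """
--     If this line starts a node block like:
--         "123" [ ...   (possibly continues)
--     return (node_id, remainder_after_open_bracket)
--     Else return None.
--
--     Reject edge lines that look like:
--         "src" -> "dst" [ ...
--     """
--     s = line.strip()
--     if not s.startswith('"'):
--         return None
--     # Reject edges
--     if '->' in s:
--         return None
--     # Find node id
--     i = 1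
--     n = len(s)
--     while i < n and s[i] != '"':
--         i += 1
--     if i >= n:
--         return None
--     node_id = s[1:i]
--     j = i + 1
--     # Skip spaces
--     while j < n and s[j].isspace():
--         j += 1
--     if j < n and s[j] == '[':
--         # Capture remainder after the first '['
--         return node_id, s[j+1:]
--     return None
-- ===== SOURCE B (Python) =====
-- import re
--
-- _NODE_RE = re.compile(r'"([^"]*)"\s*\[(.*)', re.DOTALL)
--
-- def _node_start(line):
--     s = line.strip()
--     if '->' in s:
--         return None
--     m = _NODE_RE.match(s)
--     if m is None:
--         return None
--     return m.group(1), m.group(2)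
-- ===== Notes on version B (the rewrite author's own statement) =====
-- stated objective: idiomatic
-- what changed: Replaced A's hand-written character scanning (manual quote-scan loop, whitespace-skip loop, bracket check with index slicing) by a single anchored regular-expression match (opening quote, group capturing up to the closing quote, optional whitespace, opening bracket, group capturing the rest, with DOTALL), keeping only the strip and the arrow edge-line rejection.
import Mathlib
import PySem

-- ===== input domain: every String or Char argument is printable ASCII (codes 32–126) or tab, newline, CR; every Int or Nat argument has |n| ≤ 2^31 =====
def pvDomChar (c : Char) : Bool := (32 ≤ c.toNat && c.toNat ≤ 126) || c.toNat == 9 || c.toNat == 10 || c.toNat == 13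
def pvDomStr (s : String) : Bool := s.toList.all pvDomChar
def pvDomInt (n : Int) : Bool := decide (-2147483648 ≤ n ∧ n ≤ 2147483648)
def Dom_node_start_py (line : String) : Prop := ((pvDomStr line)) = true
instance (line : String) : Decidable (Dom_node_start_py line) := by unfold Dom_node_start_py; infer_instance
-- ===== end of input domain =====

-- B replaces A's hand-written index loops (quote scan, space skip, bracket check) by one
-- anchored regular-expression match '"([^"]*)"\s*\[(.*)' (DOTALL): idiomatic, same value
-- on every admitted input; the regex engine does the scanning.

-- ===== PORT A =====
-- while i < n and s[i] != '"': i += 1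
def nsFindQuote (cs : List Char) (n i : Nat) : Nat :=
  if i < n then
    if cs.getD i ' ' = '"' then i else nsFindQuote cs n (i + 1)
  else i
termination_by n - i

-- while j < n and s[j].isspace(): j += 1
def nsSkipSpace (cs : List Char) (n j : Nat) : Nat :=
  if j < n then
    if PySem.Chars.isspace (cs.getD j ' ') then nsSkipSpace cs n (j + 1) else j
  else j
termination_by n - j

def node_start_py (line : String) : Option (String × String) :=
  let s := PySem.Str.strip line
  if !PySem.Str.startswith s "\"" then none
  else if PySem.Str.isIn "->" s then none
  else
    let cs := s.toList
    let n := cs.length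
    let i := nsFindQuote cs n 1
    if n ≤ i then none
    else
      let node_id := PySem.Str.slice s (some 1) (some (i : Int))
      let j := nsSkipSpace cs n (i + 1)
      if j < n && (cs.getD j ' ' == '[') then
        some (node_id, PySem.Str.slice s (some ((j : Int) + 1)) none)
      else none

-- ===== PORT B =====
-- regex character class \s, ported for the ASCII range (exact on the stated printable-ASCII
-- + tab/newline/CR domain; re.UNICODE \s also matches codepoints outside that domain)
def reSpace (c : Char) : Bool :=
  c == ' ' || c == '\t' || c == '\n' || c == '\r' || c == '\x0b' || c == '\x0c'

-- hand port (step for step) of _NODE_RE.match on the pattern '"([^"]*)"\s*\[(.*)' with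
-- re.DOTALL: literal '"', greedy group [^"]* (span up to the next quote), literal '"',
-- \s* (dropWhile reSpace — greedy, and backtracking cannot help since '[' is not in \s),
-- literal '[', then group (.*) capturing the rest (DOTALL: '.' matches newlines too)
def reMatchNode (cs : List Char) : Option (List Char × List Char) :=
  match cs with
  | [] => none
  | c :: rest =>
    if c = '"' then
      let p := rest.span (fun c => c != '"')
      match p.2 with
      | [] => none
      | c2 :: rest2 =>
        if c2 = '"' then
          match rest2.dropWhile reSpace with
          | [] => none
          | c3 :: tail => if c3 = '[' then some (p.1, tail) else none
        else none
    else none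

def node_start_py_alt (line : String) : Option (String × String) :=
  let s := PySem.Str.strip line
  if PySem.Str.isIn "->" s then none
  else
    match reMatchNode s.toList with
    | none => none
    | some (a, b) => some (String.ofList a, String.ofList b)

-- ===== PRECONDITION & SPEC =====
def Spec_node_start_py (line : String) (out : Option (String × String)) : Prop := out = node_start_py_alt line
instance (line : String) (out : Option (String × String)) : Decidable (Spec_node_start_py line out) := by unfold Spec_node_start_py; infer_instance

-- ===== CLAIM (what is proved, stated in full; the proofs are below) =====
def Claim_equal_node_start_py : Prop := ∀ (line : String), Dom_node_start_py line → Spec_node_start_py line (node_start_py line)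

-- ===== LEMMAS AND PROOFS =====

lemma getD_space_eq (l : List Char) (k : Nat) (h : k < l.length) : l.getD k ' ' = l[k] := by
  rw [List.getD_eq_getElem?_getD, List.getElem?_eq_getElem h]
  rfl

-- dropWhile with pointwise-equal predicates
lemma dropWhile_congr' {α : Type} (p q : α → Bool) (l : List α)
    (h : ∀ x ∈ l, p x = q x) : l.dropWhile p = l.dropWhile q := by
  induction l with
  | nil => rfl
  | cons a t ih =>
    rw [List.dropWhile_cons, List.dropWhile_cons, h a List.mem_cons_self]
    split_ifs with hq
    · exact ih (fun x hx => h x (List.mem_cons_of_mem a hx))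
    · rfl

-- spec of A's quote-scanning loop: it stops at the first quote at index ≥ i, or at n
lemma fq_spec : ∀ (d : Nat) (cs : List Char) (i : Nat), cs.length - i ≤ d → i ≤ cs.length →
    i ≤ nsFindQuote cs cs.length i ∧ nsFindQuote cs cs.length i ≤ cs.length ∧
    (∀ k, i ≤ k → k < nsFindQuote cs cs.length i → cs.getD k ' ' ≠ '"') ∧
    (nsFindQuote cs cs.length i < cs.length → cs.getD (nsFindQuote cs cs.length i) ' ' = '"') := by
  intro d
  induction d with
  | zero =>
    intro cs i hd hi
    have hnf : nsFindQuote cs cs.length i = i := by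
      rw [nsFindQuote, if_neg (by omega)]
    rw [hnf]
    exact ⟨le_refl _, hi, fun k h1 h2 => absurd h2 (by omega), fun h => absurd h (by omega)⟩
  | succ d ih =>
    intro cs i hd hi
    by_cases h : i < cs.length
    · by_cases hq : cs.getD i ' ' = '"'
      · have hnf : nsFindQuote cs cs.length i = i := by
          rw [nsFindQuote, if_pos h, if_pos hq]
        rw [hnf]
        exact ⟨le_refl _, by omega, fun k h1 h2 => absurd h2 (by omega), fun _ => hq⟩
      · have hnf : nsFindQuote cs cs.length i = nsFindQuote cs cs.length (i + 1) := by
          rw [nsFindQuote, if_pos h, if_neg hq]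
        obtain ⟨h1, h2, h3, h4⟩ := ih cs (i + 1) (by omega) (by omega)
        rw [hnf]
        refine ⟨by omega, h2, ?_, h4⟩
        intro k hk1 hk2
        rcases Nat.eq_or_lt_of_le hk1 with rfl | hk
        · exact hq
        · exact h3 k (by omega) hk2
    · have hnf : nsFindQuote cs cs.length i = i := by
        rw [nsFindQuote, if_neg h]
      rw [hnf]
      exact ⟨le_refl _, hi, fun k hk1 hk2 => absurd hk2 (by omega), fun hlt => absurd hlt (by omega)⟩

-- spec of A's space-skipping loop: it lands exactly where dropWhile isspace lands
lemma ss_spec : ∀ (d : Nat) (cs : List Char) (j : Nat), cs.length - j ≤ d → j ≤ cs.length →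
    nsSkipSpace cs cs.length j ≤ cs.length ∧
    cs.drop (nsSkipSpace cs cs.length j) = (cs.drop j).dropWhile PySem.Chars.isspace := by
  intro d
  induction d with
  | zero =>
    intro cs j hd hj
    have hjeq : j = cs.length := by omega
    have hnf : nsSkipSpace cs cs.length j = j := by
      rw [nsSkipSpace, if_neg (by omega)]
    rw [hnf, hjeq]
    simp
  | succ d ih =>
    intro cs j hd hj
    by_cases h : j < cs.length
    · have hdrop : cs.drop j = cs[j] :: cs.drop (j + 1) := List.drop_eq_getElem_cons h
      have hgd : cs.getD j ' ' = cs[j] := getD_space_eq cs j h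
      by_cases hs : PySem.Chars.isspace (cs.getD j ' ') = true
      · have hnf : nsSkipSpace cs cs.length j = nsSkipSpace cs cs.length (j + 1) := by
          rw [nsSkipSpace, if_pos h, if_pos hs]
        obtain ⟨h1, h2⟩ := ih cs (j + 1) (by omega) (by omega)
        refine ⟨by rw [hnf]; exact h1, ?_⟩
        rw [hnf, h2, hdrop, List.dropWhile_cons]
        rw [hgd] at hs
        simp [hs]
      · have hnf : nsSkipSpace cs cs.length j = j := by
          rw [nsSkipSpace, if_pos h, if_neg hs]
        refine ⟨by omega, ?_⟩
        rw [hgd] at hs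
        rw [hnf, hdrop, List.dropWhile_cons]
        simp [hs]
    · have hjeq : j = cs.length := by omega
      have hnf : nsSkipSpace cs cs.length j = j := by
        rw [nsSkipSpace, if_neg h]
      rw [hnf, hjeq]
      simp

lemma char_toNat_inj {c d : Char} (h : c.toNat = d.toNat) : c = d :=
  Char.ext (UInt32.toNat_inj.mp h)

lemma char_beq_toNat (c d : Char) : (c == d) = decide (c.toNat = d.toNat) := by
  rw [Bool.eq_iff_iff, beq_iff_eq, decide_eq_true_eq]
  exact ⟨fun h => h ▸ rfl, char_toNat_inj⟩

-- isspace and the regex \s agree on the stated ASCII domain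
lemma isspace_eq_reSpace (c : Char) (h : pvDomChar c = true) :
    PySem.Chars.isspace c = reSpace c := by
  simp only [pvDomChar, Bool.or_eq_true, Bool.and_eq_true, decide_eq_true_eq, beq_iff_eq] at h
  have hn : (32 ≤ c.toNat ∧ c.toNat ≤ 126) ∨ c.toNat = 9 ∨ c.toNat = 10 ∨ c.toNat = 13 := by
    rcases h with ((h | h) | h) | h
    · exact Or.inl h
    · exact Or.inr (Or.inl h)
    · exact Or.inr (Or.inr (Or.inl h))
    · exact Or.inr (Or.inr (Or.inr h))
  simp only [PySem.Chars.isspace, reSpace, char_beq_toNat,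
    show (' ').toNat = 32 from rfl, show ('\t').toNat = 9 from rfl,
    show ('\n').toNat = 10 from rfl, show ('\r').toNat = 13 from rfl,
    show ('\x0b').toNat = 11 from rfl, show ('\x0c').toNat = 12 from rfl]
  rw [Bool.eq_iff_iff]
  simp only [Bool.or_eq_true, Bool.and_eq_true, decide_eq_true_eq]
  omega

-- the first element surviving dropWhile fails the predicate
lemma dropWhile_cons_head_false {α : Type} (p : α → Bool) (l : List α) (c : α) (t : List α)
    (h : l.dropWhile p = c :: t) : p c = false := by
  have hne : l.dropWhile p ≠ [] := by rw [h]; simp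
  have h2 := List.head_dropWhile_not p hne
  have h3 : (l.dropWhile p).head hne = c := by simp only [h, List.head_cons]
  rw [h3] at h2
  exact h2

-- the central pointwise equality on the domain
set_option maxHeartbeats 1000000 in
lemma node_start_eq (line : String) (hdom : pvDomStr line = true) :
    node_start_py line = node_start_py_alt line := by
  -- the domain condition transfers to the stripped string
  have hdomS : ∀ c ∈ (PySem.Str.strip line).toList, pvDomChar c = true := by
    intro c hc
    have hsubl : (PySem.Str.strip line).toList.Sublist line.toList := by
      rw [PySem.Str.toList_strip]
      unfold PySem.Chars.strip PySem.Chars.rstrip PySem.Chars.lstrip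
      have h1 : (List.dropWhile PySem.Chars.isspace line.toList).Sublist line.toList :=
        List.dropWhile_sublist _
      have h2 := (List.dropWhile_sublist (l := (List.dropWhile PySem.Chars.isspace line.toList).reverse) PySem.Chars.isspace).reverse
      rw [List.reverse_reverse] at h2
      exact h2.trans h1
    have := hsubl.mem hc
    exact List.all_eq_true.mp hdom c this
  by_cases hin : PySem.Str.isIn "->" (PySem.Str.strip line) = true
  case pos =>
    have hA : node_start_py line = none := by
      simp only [node_start_py]
      by_cases hsw : PySem.Str.startswith (PySem.Str.strip line) "\"" = true
      · rw [if_neg (by rw [hsw]; decide), if_pos hin]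
      · rw [if_pos (by simp only [Bool.not_eq_true] at hsw; rw [hsw]; decide)]
    have hB : node_start_py_alt line = none := by
      simp only [node_start_py_alt]
      rw [if_pos hin]
    rw [hA, hB]
  case neg =>
  have hinf : PySem.Str.isIn "->" (PySem.Str.strip line) = false := by
    cases hb : PySem.Str.isIn "->" (PySem.Str.strip line)
    · rfl
    · exact absurd hb hin
  by_cases hsw : PySem.Str.startswith (PySem.Str.strip line) "\"" = true
  case neg =>
    have hswf : PySem.Str.startswith (PySem.Str.strip line) "\"" = false := by
      cases hb : PySem.Str.startswith (PySem.Str.strip line) "\""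
      · rfl
      · exact absurd hb hsw
    have hA : node_start_py line = none := by
      simp only [node_start_py]
      rw [if_pos (by rw [hswf]; decide)]
    have hB : node_start_py_alt line = none := by
      simp only [node_start_py_alt]
      rw [if_neg hin]
      have hnp : ¬ (['"'] <+: (PySem.Str.strip line).toList) := by
        intro hp
        have h1 : PySem.Str.startswith (PySem.Str.strip line) "\"" = true := by
          rw [PySem.Str.startswith_eq]
          exact (PySem.Chars.startswith_iff _ _).mpr hp
        rw [h1] at hswf
        cases hswf
      cases hcs : (PySem.Str.strip line).toList with
      | nil => simp [reMatchNode]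
      | cons c rest =>
        have hc : c ≠ '"' := by
          intro hc
          apply hnp
          rw [hcs, hc]
          exact ⟨rest, rfl⟩
        simp [reMatchNode, hc]
    rw [hA, hB]
  case pos =>
  set s := PySem.Str.strip line with hs
  set cs := s.toList with hcs
  have hpre : ('"' : Char) :: [] <+: cs := by
    have h1 := (PySem.Chars.startswith_iff (s := cs) (p := ("\"" : String).toList)).mp
      (by rw [← PySem.Str.startswith_eq]; exact hsw)
    exact h1
  obtain ⟨rest, hrest⟩ := hpre
  simp only [List.cons_append, List.nil_append] at hrest
  -- hrest : '"' :: rest = cs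
  have hn : cs.length = 1 + rest.length := by rw [← hrest]; simp; omega
  set T := rest.takeWhile (fun c => c != '"') with hT
  set W := rest.dropWhile (fun c => c != '"') with hW
  have hTW : T ++ W = rest := List.takeWhile_append_dropWhile
  have hTpre : T <+: rest := List.takeWhile_prefix _
  have hTlen : T.length ≤ rest.length := hTpre.length_le
  have hTtake : rest.take T.length = T := by
    obtain ⟨u, hu⟩ := hTpre
    rw [← hu, List.take_left]
  have hTdrop : rest.drop T.length = W := by
    rw [← hTW, List.drop_left]
  -- index arithmetic between cs and rest
  have hgd_rest : ∀ (k : Nat) (hk : k < rest.length), cs.getD (1 + k) ' ' = rest[k]'hk := by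
    intro k hk
    have h1 : cs.getD (1 + k) ' ' = rest.getD k ' ' := by
      rw [← hrest]
      have : 1 + k = k + 1 := by omega
      rw [this, List.getD_cons_succ]
    rw [h1, getD_space_eq rest k hk]
  -- A's quote scan lands exactly at 1 + T.length
  obtain ⟨hr1, hr2, hr3, hr4⟩ := fq_spec (cs.length - 1) cs 1 (le_refl _) (by omega)
  obtain ⟨r, hrdef⟩ : ∃ r, nsFindQuote cs cs.length 1 = r := ⟨_, rfl⟩
  rw [hrdef] at hr1 hr2 hr3 hr4
  have hreq : r = 1 + T.length := by
    rcases lt_trichotomy r (1 + T.length) with h | h | h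
    · exfalso
      have hrlt : r < cs.length := by omega
      have hq := hr4 hrlt
      have hk : r - 1 < T.length := by omega
      have hkr : r - 1 < rest.length := by omega
      have h2 : cs.getD (1 + (r - 1)) ' ' = rest[r - 1] := hgd_rest (r - 1) hkr
      have h3 : 1 + (r - 1) = r := by omega
      rw [h3] at h2
      have hmem : rest[r - 1] ∈ T := by
        have h4 : T[r - 1]'hk = rest[r - 1]'hkr := hTpre.getElem hk
        rw [← h4]
        exact List.getElem_mem hk
      have h5 := List.mem_takeWhile_imp hmem
      simp only [bne_iff_ne, ne_eq] at h5
      exact h5 (by rw [← h2, hq])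
    · exact h
    · exfalso
      have hTlt : T.length < rest.length := by omega
      have hWne : W ≠ [] := by
        intro hWnil
        have := hTW
        rw [hWnil, List.append_nil] at this
        rw [this] at hTlt
        omega
      obtain ⟨w0, W', hW0⟩ := List.exists_cons_of_ne_nil hWne
      have hpw : ((fun c => c != '"') w0) = false :=
        dropWhile_cons_head_false _ rest w0 W' (by rw [← hW]; exact hW0)
      have hw0q : w0 = '"' := by simpa using hpw
      have h2 := hr3 (1 + T.length) (by omega) h
      have h3 : cs.getD (1 + T.length) ' ' = rest[T.length] := hgd_rest T.length hTlt
      have hTq : rest[T.length]? = some w0 := by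
        rw [← List.head?_drop, hTdrop, hW0]
        rfl
      have h4 : rest[T.length]'hTlt = w0 := by
        rw [List.getElem?_eq_getElem hTlt] at hTq
        exact Option.some_inj.mp hTq
      rw [h3, h4, hw0q] at h2
      exact h2 rfl
  -- the span in B
  have hspan : rest.span (fun c => c != '"') = (T, W) := List.span_eq_takeWhile_dropWhile _ _
  have hcs2 : (PySem.Str.strip line).toList = '"' :: rest := by
    rw [← hs, ← hcs, ← hrest]
  cases hWcase : W with
  | nil =>
    -- no closing quote: both none
    have hrn : r = cs.length := by
      have : T = rest := by rw [← hTW, hWcase, List.append_nil]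
      rw [hreq, this, hn]
    have hA : node_start_py line = none := by
      simp only [node_start_py]
      rw [← hs, if_neg (by rw [hsw]; decide), if_neg hin, ← hcs, hrdef, if_pos (by omega)]
    have hB : node_start_py_alt line = none := by
      simp only [node_start_py_alt]
      rw [if_neg hin, hcs2]
      simp only [reMatchNode, hspan, hWcase]
      simp
    rw [hA, hB]
  | cons c2 rest2 =>
    have hWne : W ≠ [] := by rw [hWcase]; simp
    have hc2 : c2 = '"' := by
      have hpw : ((fun c => c != '"') c2) = false :=
        dropWhile_cons_head_false _ rest c2 rest2 (by rw [← hW]; exact hWcase)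
      simpa using hpw
    have hWlen : cs.length = 1 + T.length + W.length := by
      rw [hn, ← hTW]
      simp
      omega
    have hrlt : r < cs.length := by
      rw [hreq, hWlen, hWcase]
      simp only [List.length_cons]
      omega
    -- the node id: s[1:r] = T
    have hid : (PySem.Str.slice s (some 1) (some (r : Int))).toList = T := by
      rw [PySem.Str.toList_slice, PySem.Chars.slice_eq_listSlice]
      rw [show ((1 : Int)) = (((1 : Nat) : Int)) by norm_num]
      rw [PySem.List.slice_natCast]
      rw [← hcs, ← hrest]
      simp only [List.drop_succ_cons, List.drop_zero]
      rw [hreq]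
      have : 1 + T.length - 1 = T.length := by omega
      rw [this, hTtake]
    -- the tail after the closing quote
    have hdropr1 : cs.drop (r + 1) = rest2 := by
      rw [← hrest, hreq]
      have h1 : ('"' :: rest).drop (1 + T.length + 1) = rest.drop (T.length + 1) := by
        have : 1 + T.length + 1 = (T.length + 1) + 1 := by omega
        rw [this, List.drop_succ_cons]
      rw [h1, ← List.drop_drop, hTdrop, hWcase, List.drop_one, List.tail_cons]
    -- A's space skip = dropWhile isspace on rest2, and isspace = reSpace there
    obtain ⟨hj1, hj2⟩ := ss_spec (cs.length - (r + 1)) cs (r + 1) (le_refl _) (by omega)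
    obtain ⟨j, hjdef⟩ : ∃ j, nsSkipSpace cs cs.length (r + 1) = j := ⟨_, rfl⟩
    rw [hjdef] at hj1 hj2
    have hrest2dom : ∀ c ∈ rest2, pvDomChar c = true := by
      intro c hc
      apply hdomS
      rw [← hrest]
      right
      have h1 : c ∈ W := by rw [hWcase]; exact List.mem_cons_of_mem _ hc
      exact (List.dropWhile_sublist _).mem h1
    obtain ⟨Wb, hWb⟩ : ∃ wb, rest2.dropWhile reSpace = wb := ⟨_, rfl⟩
    have hdropj : cs.drop j = Wb := by
      rw [hj2, hdropr1, ← hWb]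
      exact dropWhile_congr' _ _ _ (fun c hc => isspace_eq_reSpace c (hrest2dom c hc))
    -- reduce A to its bracket test
    have hA : node_start_py line =
        (if j < cs.length && (cs.getD j ' ' == '[') then
          some (PySem.Str.slice s (some 1) (some (r : Int)),
                PySem.Str.slice s (some ((j : Int) + 1)) none)
        else none) := by
      simp only [node_start_py]
      rw [← hs, if_neg (by rw [hsw]; decide), if_neg hin, ← hcs, hrdef,
        if_neg (by omega), hjdef]
    cases Wb with
    | nil =>
      have hB : node_start_py_alt line = none := by
        simp only [node_start_py_alt]
        rw [if_neg hin, hcs2]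
        simp only [reMatchNode, hspan, hWcase, if_true]
        simp only [if_pos hc2]
        rw [hWb]
      have hjn : cs.length ≤ j := by
        have h1 : cs.drop j = [] := hdropj
        exact List.drop_eq_nil_iff.mp h1
      rw [hA, hB]
      rw [if_neg (by
        simp only [Bool.and_eq_true, decide_eq_true_eq]
        exact fun hcon => absurd hcon.1 (by omega))]
    | cons c3 tail =>
      have hB : node_start_py_alt line =
          (if c3 = '[' then some (String.ofList T, String.ofList tail) else none) := by
        simp only [node_start_py_alt]
        rw [if_neg hin, hcs2]
        simp only [reMatchNode, hspan, hWcase, if_true]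
        simp only [if_pos hc2]
        rw [hWb]
        by_cases hbr : c3 = '['
        · simp [hbr]
        · simp [hbr]
      have hjlt : j < cs.length := by
        by_contra hge
        have h1 : cs.drop j = [] := List.drop_eq_nil_iff.mpr (by omega)
        rw [hdropj] at h1
        cases h1
      have hdropj' : cs.drop j = c3 :: tail := hdropj
      have hcj : cs.getD j ' ' = c3 := by
        rw [getD_space_eq cs j hjlt]
        have h1 : cs[j]? = some c3 := by
          rw [← List.head?_drop, hdropj']
          rfl
        rw [List.getElem?_eq_getElem hjlt] at h1
        exact Option.some_inj.mp h1
      have hdropj1 : cs.drop (j + 1) = tail := by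
        have h2 : cs.drop (j + 1) = (cs.drop j).drop 1 := by
          rw [List.drop_drop]
        rw [h2, hdropj', List.drop_one, List.tail_cons]
      rw [hA, hB]
      by_cases hbr : c3 = '['
      · rw [if_pos (by
            rw [hcj, hbr]
            simp only [beq_self_eq_true, Bool.and_true, decide_eq_true_eq]
            exact hjlt), if_pos hbr]
        refine congrArg some (Prod.ext ?_ ?_)
        · apply String.toList_inj.mp
          rw [hid]
          simp only [String.toList_ofList]
        · apply String.toList_inj.mp
          rw [PySem.Str.toList_slice, PySem.Chars.slice_eq_listSlice]
          rw [show (((j : Nat) : Int) + 1) = (((j + 1 : Nat) : Int)) by push_cast; ring]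
          rw [PySem.List.slice_from_natCast, ← hcs, hdropj1]
          simp only [String.toList_ofList]
      · rw [if_neg (by
          rw [hcj]
          simp only [Bool.and_eq_true, decide_eq_true_eq, beq_iff_eq]
          exact fun hcon => hbr hcon.2), if_neg hbr]

-- ===== VERDICT (by name: the statement is the Claim_ definition above) =====
theorem node_start_py_spec : Claim_equal_node_start_py := by
  intro line hdom
  unfold Spec_node_start_py
  exact node_start_eq line hdom
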